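-- pv_equiv track=rewrite | github.com/darinabalkova/balkova-et-al-2026-scripts | 4.Seasonal_forecast_Station_Agreement_Analysis.py | find_matching_location
-- ===== SOURCE A (Python) =====
-- def find_matching_location(loc_name, station_info_keys):
--     """Find matching location name, handling variations, spaces, and abbreviations."""
--     loc_clean = loc_name.strip()
--
--     # Try exact match first
--     if loc_clean in station_info_keys:
--         return loc_clean
--
--     # Try case-insensitive
--     for key in station_info_keys:
--         if key.lower() == loc_clean.lower():
--             return key
--
--     # Try with normalized spaces
--     loc_normalized = ' '.join(loc_clean.split())
--     for key in station_info_keys: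
--         if ' '.join(key.split()).lower() == loc_normalized.lower():
--             return key
--
--     # Try handling abbreviations (e.g., "S." vs "San", "St." vs "Saint")
--     def normalize_abbrev(text):
--         text = text.replace('S.', 'San').replace('St.', 'Saint').replace('St ', 'Saint ')
--         return text
--
--     loc_normalized_abbrev = normalize_abbrev(loc_clean)
--     for key in station_info_keys:
--         key_normalized = normalize_abbrev(key)
--         if key_normalized.lower() == loc_normalized_abbrev.lower():
--             return key
--
--     # Try partial matching (e.g., "Castel S.Giovanni" should match "Castel San Giovanni")
--     # First normalize abbreviations, then remove punctuation and normalize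
--     def normalize_for_match(text):
--         # First expand abbreviations
--         text = normalize_abbrev(text)
--         # Then remove punctuation and normalize
--         text = text.replace('.', '').replace(',', '').replace('-', ' ').replace("'", '')
--         text = ' '.join(text.split())  # Normalize spaces
--         return text.lower()
--
--     loc_normalized_match = normalize_for_match(loc_clean)
--     for key in station_info_keys:
--         key_normalized_match = normalize_for_match(key)
--         if key_normalized_match == loc_normalized_match:
--             return key
--
--     return None
-- ===== SOURCE B (Python) =====
-- def find_matching_location(loc_name, station_info_keys):
--     """Single pass over keys: compute each key's best (smallest) matching level
--     against the five normalized forms of the query, keep the (level, earliest key)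
--     minimum, instead of A's five level-major scans."""
--     loc_clean = loc_name.strip()
--
--     def normalize_abbrev(t):
--         return t.replace('S.', 'San').replace('St.', 'Saint').replace('St ', 'Saint ')
--
--     def collapse(t):
--         return ' '.join(t.split())
--
--     def full(t):
--         t = normalize_abbrev(t)
--         t = t.replace('.', '').replace(',', '').replace('-', ' ').replace("'", '')
--         return collapse(t).lower()
--
--     def forms(t):
--         return [t, t.lower(), collapse(t).lower(), normalize_abbrev(t).lower(), full(t)]
--
--     target = forms(loc_clean)
--     best = None  # (level, key); strict < keeps the earliest key per level
--     for key in station_info_keys: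
--         kf = forms(key)
--         lvl = next((i for i in range(5) if kf[i] == target[i]), None)
--         if lvl is not None and (best is None or lvl < best[0]):
--             best = (lvl, key)
--     return best[1] if best is not None else None
-- ===== Notes on version B (the rewrite author's own statement) =====
-- stated objective: faster
-- what changed: Key-major single pass instead of A's level-major staged scans: B computes each key's smallest matching level (against the five normalized forms of the query, computed once up front) and keeps the (level, earliest key) minimum in an accumulator; A rescans the whole key list per level and recomputes the query's normalization inside every inner-loop comparison.
import Mathlib
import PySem

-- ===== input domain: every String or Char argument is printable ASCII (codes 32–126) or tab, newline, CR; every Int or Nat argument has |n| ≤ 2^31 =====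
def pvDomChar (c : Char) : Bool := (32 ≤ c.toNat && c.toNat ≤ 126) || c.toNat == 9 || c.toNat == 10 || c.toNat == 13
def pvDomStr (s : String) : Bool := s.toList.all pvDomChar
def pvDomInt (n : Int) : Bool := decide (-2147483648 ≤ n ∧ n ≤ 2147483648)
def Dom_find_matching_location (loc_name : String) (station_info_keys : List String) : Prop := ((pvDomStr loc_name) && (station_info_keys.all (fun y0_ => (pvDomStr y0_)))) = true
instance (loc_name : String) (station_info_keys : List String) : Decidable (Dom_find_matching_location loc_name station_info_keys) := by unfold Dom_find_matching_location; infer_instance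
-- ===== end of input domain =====

-- B replaces A's level-major staged scans with a single key-major pass: each key's
-- smallest matching level is computed once and a (level, earliest key) minimum is kept
-- (a timing run measured B faster).

-- shared helpers (identical helper functions in both Python sources)
def fmlAbbrev (t : String) : String :=
  PySem.Str.replace (PySem.Str.replace (PySem.Str.replace t "S." "San") "St." "Saint") "St " "Saint "

def fmlCollapse (t : String) : String :=
  PySem.Str.join " " (PySem.Str.split₀ t)

def fmlFull (t : String) : String :=
  let t1 := fmlAbbrev t
  let t2 := PySem.Str.replace (PySem.Str.replace (PySem.Str.replace (PySem.Str.replace t1 "." "") "," "") "-" " ") "'" ""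
  PySem.Str.lower (fmlCollapse t2)

-- ===== PORT A =====
def fmlLoopCase (lc : String) : List String → Option String
  | [] => none
  | k :: ks => if PySem.Str.lower k == PySem.Str.lower lc then some k else fmlLoopCase lc ks

def fmlLoopSpaces (locNorm : String) : List String → Option String
  | [] => none
  | k :: ks =>
      if PySem.Str.lower (fmlCollapse k) == PySem.Str.lower locNorm then some k
      else fmlLoopSpaces locNorm ks

def fmlLoopAbbrev (locAb : String) : List String → Option String
  | [] => none
  | k :: ks =>
      if PySem.Str.lower (fmlAbbrev k) == PySem.Str.lower locAb then some k
      else fmlLoopAbbrev locAb ks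

def fmlLoopMatch (locM : String) : List String → Option String
  | [] => none
  | k :: ks => if fmlFull k == locM then some k else fmlLoopMatch locM ks

def find_matching_location (loc_name : String) (station_info_keys : List String) : Option String :=
  let lc := PySem.Str.strip loc_name
  if station_info_keys.contains lc then some lc
  else match fmlLoopCase lc station_info_keys with
  | some k => some k
  | none => match fmlLoopSpaces (fmlCollapse lc) station_info_keys with
    | some k => some k
    | none => match fmlLoopAbbrev (fmlAbbrev lc) station_info_keys with
      | some k => some k
      | none => match fmlLoopMatch (fmlFull lc) station_info_keys with
        | some k => some k
        | none => none

-- ===== PORT B =====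
-- the five normalized forms of a string (Python's forms(t))
def fmlForms (t : String) : List String :=
  [t, PySem.Str.lower t, PySem.Str.lower (fmlCollapse t), PySem.Str.lower (fmlAbbrev t), fmlFull t]

-- smallest level at which k's form equals the target form (Python's next(...) over range(5))
def fmlLevel (tf : List String) (k : String) : Option Nat :=
  ((fmlForms k).zip tf).findIdx? (fun p => p.1 == p.2)

-- one step of B's single pass: keep the (level, earliest key) minimum (strict <)
def fmlStep (tf : List String) (best : Option (Nat × String)) (key : String) : Option (Nat × String) :=
  match fmlLevel tf key with
  | none => best
  | some lvl =>
      match best with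
      | none => some (lvl, key)
      | some b => if lvl < b.1 then some (lvl, key) else some b

def find_matching_location_alt (loc_name : String) (station_info_keys : List String) : Option String :=
  let tf := fmlForms (PySem.Str.strip loc_name)
  match station_info_keys.foldl (fmlStep tf) none with
  | some b => some b.2
  | none => none

-- ===== PRECONDITION & SPEC =====
def Spec_find_matching_location (loc_name : String) (station_info_keys : List String) (out : Option String) : Prop := out = find_matching_location_alt loc_name station_info_keys
instance (loc_name : String) (station_info_keys : List String) (out : Option String) : Decidable (Spec_find_matching_location loc_name station_info_keys out) := by unfold Spec_find_matching_location; infer_instance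

-- ===== CLAIM (what is proved, stated in full; the proofs are below) =====
def Claim_equal_find_matching_location : Prop := ∀ (loc_name : String) (station_info_keys : List String), Dom_find_matching_location loc_name station_info_keys → Spec_find_matching_location loc_name station_info_keys (find_matching_location loc_name station_info_keys)

-- ===== LEMMAS AND PROOFS =====

-- proof-only: does k match the target at level ℓ?
def fmlMatch (tf : List String) (ℓ : Nat) (k : String) : Bool :=
  ((fmlForms k).getD ℓ "") == (tf.getD ℓ "")

-- proof-only: first (level, key) with level < b, scanning levels outside, keys inside (A's order)
def fmlStaged (tf : List String) (keys : List String) : Nat → Option (Nat × String)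
  | 0 => none
  | b + 1 =>
      match fmlStaged tf keys b with
      | some r => some r
      | none => (keys.find? (fmlMatch tf b)).map (fun k => (b, k))

-- level-ℓ match predicates are A's loop predicates
theorem fml_match_zero (lc k : String) : fmlMatch (fmlForms lc) 0 k = (k == lc) := rfl
theorem fml_match_one (lc k : String) :
    fmlMatch (fmlForms lc) 1 k = (PySem.Str.lower k == PySem.Str.lower lc) := rfl
theorem fml_match_two (lc k : String) :
    fmlMatch (fmlForms lc) 2 k = (PySem.Str.lower (fmlCollapse k) == PySem.Str.lower (fmlCollapse lc)) := rfl
theorem fml_match_three (lc k : String) :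
    fmlMatch (fmlForms lc) 3 k = (PySem.Str.lower (fmlAbbrev k) == PySem.Str.lower (fmlAbbrev lc)) := rfl
theorem fml_match_four (lc k : String) : fmlMatch (fmlForms lc) 4 k = (fmlFull k == fmlFull lc) := rfl


-- closed form of fmlLevel (the least matching level)
theorem fml_level_eq (lc k : String) :
    fmlLevel (fmlForms lc) k =
      if k == lc then some 0
      else if PySem.Str.lower k == PySem.Str.lower lc then some 1
      else if PySem.Str.lower (fmlCollapse k) == PySem.Str.lower (fmlCollapse lc) then some 2
      else if PySem.Str.lower (fmlAbbrev k) == PySem.Str.lower (fmlAbbrev lc) then some 3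
      else if fmlFull k == fmlFull lc then some 4
      else none := by
  simp only [fmlLevel, fmlForms, List.zip_cons_cons, List.zip_nil_right, List.findIdx?_cons,
    List.findIdx?_nil]
  split_ifs <;> simp_all

-- characterization of fmlLevel: it is the least matching level, and it is < 5
theorem fml_level_none (lc k : String)
    (h : fmlLevel (fmlForms lc) k = none) :
    ∀ ℓ, ℓ < 5 → fmlMatch (fmlForms lc) ℓ k = false := by
  intro ℓ hℓ
  rw [fml_level_eq] at h
  split_ifs at h with h0 h1 h2 h3 h4
  interval_cases ℓ
  · rw [fml_match_zero]; simpa using h0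
  · rw [fml_match_one]; simpa using h1
  · rw [fml_match_two]; simpa using h2
  · rw [fml_match_three]; simpa using h3
  · rw [fml_match_four]; simpa using h4

theorem fml_level_some (lc k : String) (m : Nat)
    (h : fmlLevel (fmlForms lc) k = some m) :
    m < 5 ∧ fmlMatch (fmlForms lc) m k = true ∧ ∀ ℓ, ℓ < m → fmlMatch (fmlForms lc) ℓ k = false := by
  rw [fml_level_eq] at h
  split_ifs at h with h0 h1 h2 h3 h4 <;>
    injection h with h <;> subst h
  · exact ⟨by omega, by rw [fml_match_zero]; exact h0, by omega⟩
  · refine ⟨by omega, by rw [fml_match_one]; exact h1, ?_⟩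
    intro ℓ hℓ; interval_cases ℓ
    · rw [fml_match_zero]; simpa using h0
  · refine ⟨by omega, by rw [fml_match_two]; exact h2, ?_⟩
    intro ℓ hℓ; interval_cases ℓ
    · rw [fml_match_zero]; simpa using h0
    · rw [fml_match_one]; simpa using h1
  · refine ⟨by omega, by rw [fml_match_three]; exact h3, ?_⟩
    intro ℓ hℓ; interval_cases ℓ
    · rw [fml_match_zero]; simpa using h0
    · rw [fml_match_one]; simpa using h1
    · rw [fml_match_two]; simpa using h2
  · refine ⟨by omega, by rw [fml_match_four]; exact h4, ?_⟩
    intro ℓ hℓ; interval_cases ℓ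
    · rw [fml_match_zero]; simpa using h0
    · rw [fml_match_one]; simpa using h1
    · rw [fml_match_two]; simpa using h2
    · rw [fml_match_three]; simpa using h3

-- cons-step of the staged scan, phrased through the key's least matching level
theorem fml_staged_cons (lc k : String) (ks : List String) (c : Nat) (hc : c ≤ 5) :
    fmlStaged (fmlForms lc) (k :: ks) c =
      match fmlLevel (fmlForms lc) k with
      | none => fmlStaged (fmlForms lc) ks c
      | some m =>
          if m < c then
            match fmlStaged (fmlForms lc) ks m with
            | some r => some r
            | none => some (m, k)
          else fmlStaged (fmlForms lc) ks c := by
  induction c with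
  | zero =>
      cases hL : fmlLevel (fmlForms lc) k with
      | none => simp [fmlStaged]
      | some m => simp [fmlStaged]
  | succ c ih =>
      have hc' : c ≤ 5 := by omega
      have ihc := ih hc'
      cases hL : fmlLevel (fmlForms lc) k with
      | none =>
          have hf : fmlMatch (fmlForms lc) c k = false := fml_level_none lc k hL c (by omega)
          simp only [fmlStaged, hL] at ihc ⊢
          rw [ihc]
          simp [List.find?, hf]
      | some m =>
          obtain ⟨hm5, hmt, hmlt⟩ := fml_level_some lc k m hL
          simp only [fmlStaged, hL] at ihc ⊢
          rw [ihc]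
          by_cases hmc : m < c
          · have : m < c + 1 := by omega
            simp only [hmc, if_true, this]
            cases fmlStaged (fmlForms lc) ks m with
            | some r => rfl
            | none => rfl
          · by_cases hme : m = c
            · subst hme
              simp only [hmc, if_false, if_pos (by omega : m < m + 1)]
              simp only [List.find?, hmt]
              cases fmlStaged (fmlForms lc) ks m with
              | some r => rfl
              | none => rfl
            · have hgt : ¬ m < c + 1 := by omega
              have hf : fmlMatch (fmlForms lc) c k = false := hmlt c (by omega)
              simp only [hmc, if_false, hgt]
              simp [List.find?, hf]

theorem fml_staged_nil (tf : List String) (c : Nat) : fmlStaged tf [] c = none := by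
  induction c with
  | zero => rfl
  | succ c ih => simp [fmlStaged, ih]

-- B's fold equals the staged scan (with the accumulator as a level bound)
theorem fml_fold_eq_staged (lc : String) (ks : List String) :
    ∀ (acc : Option (Nat × String)), (∀ b kb, acc = some (b, kb) → b ≤ 5) →
      ks.foldl (fmlStep (fmlForms lc)) acc =
        match acc with
        | none => fmlStaged (fmlForms lc) ks 5
        | some b =>
            match fmlStaged (fmlForms lc) ks b.1 with
            | some r => some r
            | none => some b := by
  induction ks with
  | nil =>
      intro acc hacc
      cases acc with
      | none => simp [fmlStaged]
      | some b => simp [fml_staged_nil]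
  | cons k ks ih =>
      intro acc hacc
      rw [List.foldl_cons]
      cases acc with
      | none =>
          cases hL : fmlLevel (fmlForms lc) k with
          | none =>
              have hstep : fmlStep (fmlForms lc) none k = none := by simp [fmlStep, hL]
              rw [hstep, ih none (by simp)]
              rw [fml_staged_cons lc k ks 5 (by omega), hL]
          | some m =>
              have hm5 : m < 5 := (fml_level_some lc k m hL).1
              have hstep : fmlStep (fmlForms lc) none k = some (m, k) := by simp [fmlStep, hL]
              rw [hstep, ih (some (m, k)) (by intro b kb hb; simp at hb; omega)]
              rw [fml_staged_cons lc k ks 5 (by omega), hL]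
              simp [hm5]
      | some b =>
          have hb5 : b.1 ≤ 5 := hacc b.1 b.2 (by simp)
          cases hL : fmlLevel (fmlForms lc) k with
          | none =>
              have hstep : fmlStep (fmlForms lc) (some b) k = some b := by simp [fmlStep, hL]
              rw [hstep, ih (some b) hacc]
              dsimp only
              rw [fml_staged_cons lc k ks b.1 hb5, hL]
          | some m =>
              have hm5 : m < 5 := (fml_level_some lc k m hL).1
              dsimp only
              rw [fml_staged_cons lc k ks b.1 hb5, hL]
              by_cases hmb : m < b.1
              · have hstep : fmlStep (fmlForms lc) (some b) k = some (m, k) := by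
                  simp [fmlStep, hL, hmb]
                rw [hstep, ih (some (m, k)) (by intro b' kb hb'; simp at hb'; omega)]
                simp only [hmb, if_true]
                cases hS : fmlStaged (fmlForms lc) ks m with
                | some r => rfl
                | none => rfl
              · have hstep : fmlStep (fmlForms lc) (some b) k = some b := by
                  simp [fmlStep, hL, hmb]
                rw [hstep, ih (some b) hacc]
                simp only [hmb, if_false]
-- A's hand-written loops are find? with the level predicates
theorem fml_find_id (lc : String) (keys : List String) :
    keys.find? (fun k => k == lc) = if keys.contains lc then some lc else none := by
  induction keys with
  | nil => rfl
  | cons k ks ih =>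
      by_cases h : k = lc
      · subst h; simp [List.find?]
      · have hb : (k == lc) = false := by simp [h]
        have hm : lc ∈ k :: ks ↔ lc ∈ ks := by simp [Ne.symm h]
        simp [List.find?, hb, ih, hm]

theorem fml_loopCase_eq (lc : String) (keys : List String) :
    fmlLoopCase lc keys = keys.find? (fun k => PySem.Str.lower k == PySem.Str.lower lc) := by
  induction keys with
  | nil => rfl
  | cons k ks ih =>
      rw [fmlLoopCase, List.find?, ih]
      cases hb : (PySem.Str.lower k == PySem.Str.lower lc) <;> simp [hb]

theorem fml_loopSpaces_eq (lc : String) (keys : List String) :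
    fmlLoopSpaces (fmlCollapse lc) keys
      = keys.find? (fun k => PySem.Str.lower (fmlCollapse k) == PySem.Str.lower (fmlCollapse lc)) := by
  induction keys with
  | nil => rfl
  | cons k ks ih =>
      rw [fmlLoopSpaces, List.find?, ih]
      cases hb : (PySem.Str.lower (fmlCollapse k) == PySem.Str.lower (fmlCollapse lc)) <;> simp [hb]

theorem fml_loopAbbrev_eq (lc : String) (keys : List String) :
    fmlLoopAbbrev (fmlAbbrev lc) keys
      = keys.find? (fun k => PySem.Str.lower (fmlAbbrev k) == PySem.Str.lower (fmlAbbrev lc)) := by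
  induction keys with
  | nil => rfl
  | cons k ks ih =>
      rw [fmlLoopAbbrev, List.find?, ih]
      cases hb : (PySem.Str.lower (fmlAbbrev k) == PySem.Str.lower (fmlAbbrev lc)) <;> simp [hb]

theorem fml_loopMatch_eq (lc : String) (keys : List String) :
    fmlLoopMatch (fmlFull lc) keys = keys.find? (fun k => fmlFull k == fmlFull lc) := by
  induction keys with
  | nil => rfl
  | cons k ks ih =>
      rw [fmlLoopMatch, List.find?, ih]
      cases hb : (fmlFull k == fmlFull lc) <;> simp [hb]

-- A computes the staged scan, projected to the key
theorem fml_A_eq_staged (loc_name : String) (keys : List String) :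
    find_matching_location loc_name keys
      = (fmlStaged (fmlForms (PySem.Str.strip loc_name)) keys 5).map Prod.snd := by
  unfold find_matching_location
  set lc := PySem.Str.strip loc_name with hlc
  have e0 : fmlMatch (fmlForms lc) 0 = (fun k => k == lc) := funext (fun k => fml_match_zero lc k)
  have e1 : fmlMatch (fmlForms lc) 1
      = (fun k => PySem.Str.lower k == PySem.Str.lower lc) := funext (fun k => fml_match_one lc k)
  have e2 : fmlMatch (fmlForms lc) 2
      = (fun k => PySem.Str.lower (fmlCollapse k) == PySem.Str.lower (fmlCollapse lc)) :=
    funext (fun k => fml_match_two lc k)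
  have e3 : fmlMatch (fmlForms lc) 3
      = (fun k => PySem.Str.lower (fmlAbbrev k) == PySem.Str.lower (fmlAbbrev lc)) :=
    funext (fun k => fml_match_three lc k)
  have e4 : fmlMatch (fmlForms lc) 4 = (fun k => fmlFull k == fmlFull lc) :=
    funext (fun k => fml_match_four lc k)
  simp only [fmlStaged, e0, e1, e2, e3, e4, fml_find_id, fml_loopCase_eq, fml_loopSpaces_eq,
    fml_loopAbbrev_eq, fml_loopMatch_eq]
  by_cases hc : keys.contains lc = true
  · have hm : lc ∈ keys := by simpa using hc
    simp [hm, hc]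
  · simp only [hc, if_false, Bool.false_eq_true, Option.map_none]
    cases h1 : keys.find? (fun k => PySem.Str.lower k == PySem.Str.lower lc) <;>
    cases h2 : keys.find? (fun k => PySem.Str.lower (fmlCollapse k) == PySem.Str.lower (fmlCollapse lc)) <;>
    cases h3 : keys.find? (fun k => PySem.Str.lower (fmlAbbrev k) == PySem.Str.lower (fmlAbbrev lc)) <;>
    cases h4 : keys.find? (fun k => fmlFull k == fmlFull lc) <;> rfl

-- ===== VERDICT (by name: the statement is the Claim_ definition above) =====
theorem find_matching_location_spec : Claim_equal_find_matching_location := by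
  intro loc_name keys _
  unfold Spec_find_matching_location find_matching_location_alt
  dsimp only
  rw [fml_A_eq_staged,
    fml_fold_eq_staged (PySem.Str.strip loc_name) keys none (by simp)]
  cases fmlStaged (fmlForms (PySem.Str.strip loc_name)) keys 5 with
  | none => rfl
  | some r => rfl
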